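-- pv_equiv track=rewrite | github.com/AndresCobar9/LFP_Proyecto2 | Interfaz/VentanaDescripcion.py | convert_productions
-- ===== SOURCE A (Python) =====
-- def convert_productions(productions):
--     productions_dict = {}
--
--     for production in productions:
--         parts = production.split("::=")
--         non_terminal = parts[0].strip()
--         expression = parts[1].strip()
--
--         if non_terminal in productions_dict:
--             productions_dict[non_terminal].append(expression)
--         else:
--             productions_dict[non_terminal] = [expression]
--
--     return productions_dict
-- ===== SOURCE B (Python) =====
-- # B: map each production to a (non_terminal, expression) pair, dedup the keys in
-- # first-occurrence order, then build each group with one filtering pass per key.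
-- def _split_production(p):
--     parts = p.split("::=")
--     return parts[0].strip(), parts[1].strip()
--
-- def convert_productions(productions):
--     pairs = [_split_production(p) for p in productions]
--     keys = list(dict.fromkeys(k for k, _ in pairs))
--     return {k: [e for k2, e in pairs if k2 == k] for k in keys}
-- ===== Notes on version B (the rewrite author's own statement) =====
-- stated objective: alternative
-- what changed: Replaces A's single-pass dict with incremental append by a map-to-pairs pass, an ordered dedup of the keys, and one filtering pass per distinct key that builds each group at once.
import Mathlib
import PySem

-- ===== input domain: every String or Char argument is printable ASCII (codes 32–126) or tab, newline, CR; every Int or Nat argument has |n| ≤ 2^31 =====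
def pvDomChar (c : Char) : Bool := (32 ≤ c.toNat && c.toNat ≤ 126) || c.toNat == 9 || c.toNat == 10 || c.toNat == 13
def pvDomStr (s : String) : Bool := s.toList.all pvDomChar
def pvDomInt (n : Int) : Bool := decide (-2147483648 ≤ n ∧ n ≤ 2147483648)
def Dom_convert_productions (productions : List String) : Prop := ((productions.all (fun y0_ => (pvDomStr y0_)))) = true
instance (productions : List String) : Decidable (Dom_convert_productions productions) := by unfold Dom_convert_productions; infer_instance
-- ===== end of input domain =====

-- B groups productions by non-terminal via map-to-pairs + ordered key dedup + one filter per key,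
-- instead of A's incremental dict building; return values agree wherever A does not raise.

-- ===== PORT A =====
def convert_productions (productions : List String) : List (String × List String) :=
  (productions.foldl
    (fun productions_dict production =>
      let parts := (PySem.Str.split? production "::=").getD []  -- split? is some: the literal sep "::=" is nonempty
      let non_terminal := PySem.Str.strip (PySem.List.pyGetD parts 0 "")
      let expression := PySem.Str.strip (PySem.List.pyGetD parts 1 "")
      if productions_dict.contains non_terminal then
        productions_dict.modify non_terminal [] (fun l => l ++ [expression])
      else
        productions_dict.insert non_terminal [expression])
    PySem.Dict.empty).items

-- ===== PORT B =====
def pvSplitProduction (p : String) : String × String :=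
  let parts := (PySem.Str.split? p "::=").getD []
  (PySem.Str.strip (PySem.List.pyGetD parts 0 ""), PySem.Str.strip (PySem.List.pyGetD parts 1 ""))

def convert_productions_alt (productions : List String) : List (String × List String) :=
  let pairs := productions.map pvSplitProduction
  let keys := PySem.List.dedup (pairs.map Prod.fst)
  keys.map (fun k => (k, (pairs.filter (fun q => q.1 == k)).map Prod.snd))

-- ===== PRECONDITION & SPEC =====
-- Pre_ excludes exactly the productions lacking "::=", on which Python A raises IndexError at parts[1].
def Pre_convert_productions (productions : List String) : Prop :=
  ∀ p ∈ productions, 2 ≤ ((PySem.Str.split? p "::=").getD []).length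
instance (productions : List String) : Decidable (Pre_convert_productions productions) := by
  unfold Pre_convert_productions; infer_instance

def pvWitness_convert_productions : List String := ["A ::= a b", "B ::= c", "A ::= d"]

def Spec_convert_productions (productions : List String) (out : List (String × List String)) : Prop := out = convert_productions_alt productions
instance (productions : List String) (out : List (String × List String)) : Decidable (Spec_convert_productions productions out) := by unfold Spec_convert_productions; infer_instance

-- ===== CLAIM (what is proved, stated in full; the proofs are below) =====
def Claim_equal_convert_productions : Prop := ∀ (productions : List String), Dom_convert_productions productions → Pre_convert_productions productions → Spec_convert_productions productions (convert_productions productions)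

-- ===== LEMMAS AND PROOFS =====

-- the pair-level step A's loop performs, once the split/strip of the row is factored out
def pvStepPair (d : PySem.Dict String (List String)) (q : String × String) : PySem.Dict String (List String) :=
  if d.contains q.1 then d.modify q.1 [] (fun l => l ++ [q.2]) else d.insert q.1 [q.2]

-- B's grouped form of a pair list
def pvGroup (pairs : List (String × String)) : List (String × List String) :=
  (PySem.List.dedup (pairs.map Prod.fst)).map
    (fun k => (k, (pairs.filter (fun q => q.1 == k)).map Prod.snd))

theorem pvStepPair_eq_insert (d : PySem.Dict String (List String)) (q : String × String) :
    pvStepPair d q = d.insert q.1 (d.getD q.1 [] ++ [q.2]) := by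
  unfold pvStepPair PySem.Dict.modify
  by_cases h : d.contains q.1
  · simp [h]
  · rw [PySem.Dict.getD_of_not_contains _ _ (by simpa using h)]
    simp [h]

theorem pvDedup_snoc {α : Type} [BEq α] [LawfulBEq α] (xs : List α) (x : α) :
    PySem.List.dedup (xs ++ [x]) =
      if x ∈ xs then PySem.List.dedup xs else PySem.List.dedup xs ++ [x] := by
  simp only [PySem.List.dedup_eq_ofList, PySem.Set.ofList_eq_foldl, List.foldl_append,
    List.foldl_cons, List.foldl_nil]
  rw [← PySem.Set.ofList_eq_foldl]
  unfold PySem.Set.add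
  by_cases hx : x ∈ xs
  · rw [if_pos (by rw [PySem.Set.contains_iff]; simpa [PySem.List.dedup_eq_ofList] using
      (PySem.List.mem_dedup (xs := xs) (x := x)).mpr hx), if_pos hx]
  · rw [if_neg, if_neg hx]
    intro h
    exact hx ((PySem.List.mem_dedup (xs := xs) (x := x)).mp (by simpa [PySem.List.dedup_eq_ofList] using PySem.Set.contains_iff _ _ |>.mp h))

theorem pvFoldl_items_eq_group (pairs : List (String × String)) :
    ((pairs.foldl pvStepPair PySem.Dict.empty).items) = pvGroup pairs := by
  induction pairs using List.reverseRecOn with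
  | nil => rfl
  | append_singleton qs q ih =>
    obtain ⟨k, e⟩ := q
    rw [List.foldl_append, List.foldl_cons, List.foldl_nil, pvStepPair_eq_insert]
    set d := qs.foldl pvStepPair PySem.Dict.empty with hd
    have hkeys : d.keys = PySem.List.dedup (qs.map Prod.fst) := by
      show d.items.map Prod.fst = _
      rw [ih]
      simp [pvGroup, Function.comp_def]
    have hnodup : d.keys.Nodup := by
      rw [hkeys]; exact PySem.List.nodup_dedup _
    have hmapfst : (qs ++ [(k, e)]).map Prod.fst = qs.map Prod.fst ++ [k] := by simp
    by_cases hk : k ∈ qs.map Prod.fst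
    · have hc : d.contains k = true := by
        rw [PySem.Dict.contains_eq_decide_mem_keys, hkeys]
        simp [hk]
      have hv : d.getD k [] = (qs.filter (fun q => q.1 == k)).map Prod.snd := by
        have hmem : (k, (qs.filter (fun q => q.1 == k)).map Prod.snd) ∈ d.items := by
          rw [ih]
          exact List.mem_map.mpr ⟨k, by simp [hk], rfl⟩
        rw [PySem.Dict.getD_eq_get?_getD, PySem.Dict.get?_of_mem_items d hmem hnodup]
        rfl
      rw [PySem.Dict.items_insert_of_contains _ _ hc, ih, hv]
      unfold pvGroup
      rw [hmapfst, pvDedup_snoc, if_pos hk, List.map_map]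
      apply List.map_congr_left
      intro k' _
      by_cases hkk : k' = k
      · subst hkk
        simp [List.filter_append]
      · simp only [Function.comp_apply]
        rw [if_neg (by simp [hkk]), List.filter_append]
        simp [Ne.symm hkk]
    · have hc : d.contains k = false := by
        rw [PySem.Dict.contains_eq_decide_mem_keys, hkeys]
        simp [hk]
      have hfilt : qs.filter (fun q => q.1 == k) = [] := by
        rw [List.filter_eq_nil_iff]
        intro q hq hbeq
        exact hk (List.mem_map.mpr ⟨q, hq, by simpa using hbeq⟩)
      rw [PySem.Dict.items_insert_of_not_contains _ _ hc,
        PySem.Dict.getD_of_not_contains _ _ hc, ih]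
      unfold pvGroup
      rw [hmapfst, pvDedup_snoc, if_neg hk, List.map_append]
      congr 1
      · apply List.map_congr_left
        intro k' hk'
        have hkk : k' ≠ k := fun h => hk (h ▸ (PySem.List.mem_dedup _ _).mp hk')
        rw [List.filter_append]
        simp [Ne.symm hkk]
      · simp [List.filter_append, hfilt]

theorem pvMain (productions : List String) :
    convert_productions productions = convert_productions_alt productions := by
  have h : convert_productions productions
      = ((productions.map pvSplitProduction).foldl pvStepPair PySem.Dict.empty).items := by
    rw [List.foldl_map]; rfl
  rw [h, pvFoldl_items_eq_group]; rfl

-- ===== VERDICT (by name: the statement is the Claim_ definition above) =====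
theorem convert_productions_spec : Claim_equal_convert_productions := by
  intro productions _ _
  exact pvMain productions
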